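-- pv_equiv track=rewrite | github.com/sam1373/long_ie | model.py | get_pairwise_idxs
-- ===== SOURCE A (Python) =====
-- def get_pairwise_idxs(num1: int, num2: int, skip_diagonal: bool = False, sent_nums = None, sep=True):
--     idxs = []
--     for i in range(num1):
--         for j in range(num2):
--             if i == j and skip_diagonal:
--                 continue
--             if sent_nums is not None and sent_nums[i] != sent_nums[j]:
--                 continue
--             if sep:
--                 idxs.append(i)
--                 idxs.append(j)
--             else:
--                 idxs.append((i, j))
--     return idxs
-- ===== SOURCE B (Python) =====
-- def get_pairwise_idxs(num1: int, num2: int, skip_diagonal: bool = False, sent_nums = None, sep=True):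
--     if num1 <= 0 or num2 <= 0:
--         return []
--     if sent_nums is None:
--         pairs = [(i, j) for i in range(num1) for j in range(num2)
--                  if not (skip_diagonal and i == j)]
--     else:
--         # group the column indices by sentence value once, then only visit matches
--         groups = {}
--         for j in range(num2):
--             groups.setdefault(sent_nums[j], []).append(j)
--         pairs = [(i, j) for i in range(num1) for j in groups.get(sent_nums[i], [])
--                  if not (skip_diagonal and i == j)]
--     if sep:
--         return [x for p in pairs for x in p]
--     return pairs
-- ===== Notes on version B (the rewrite author's own statement) =====
-- stated objective: alternative
-- what changed: B first builds a dict grouping column indices by sentence value and, per row, iterates only the matching group (a pair list flattened at the end), instead of A's nested scan that re-tests every (i,j) pair; the inner full scan disappears.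
-- outside the precondition, e.g. on get_pairwise_idxs(1, 1, True, [], True): A returns [], B raises IndexError
import Mathlib
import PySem

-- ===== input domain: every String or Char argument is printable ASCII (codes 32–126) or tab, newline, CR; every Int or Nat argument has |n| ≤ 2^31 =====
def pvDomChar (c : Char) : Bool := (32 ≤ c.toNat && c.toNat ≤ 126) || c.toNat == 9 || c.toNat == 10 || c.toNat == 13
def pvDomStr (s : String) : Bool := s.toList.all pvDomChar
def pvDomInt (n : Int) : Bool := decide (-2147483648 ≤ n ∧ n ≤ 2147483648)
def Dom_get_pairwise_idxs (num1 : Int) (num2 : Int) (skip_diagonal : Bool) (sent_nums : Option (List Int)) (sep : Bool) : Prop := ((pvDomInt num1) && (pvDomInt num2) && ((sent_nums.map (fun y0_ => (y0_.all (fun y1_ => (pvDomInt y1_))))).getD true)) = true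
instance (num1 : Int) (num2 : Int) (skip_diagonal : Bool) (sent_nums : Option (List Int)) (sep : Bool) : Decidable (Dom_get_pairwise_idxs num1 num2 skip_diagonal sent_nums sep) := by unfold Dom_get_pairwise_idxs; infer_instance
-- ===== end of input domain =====

-- B groups column indices by sentence value in a dict once and iterates only the matching
-- group per row (pairs flattened at the end) instead of A's nested scan-and-filter; return
-- values agree on Pre_ (sep=True and sent_nums, if given, long enough for A's indexing).


-- ===== PORT A =====
def get_pairwise_idxs (num1 : Int) (num2 : Int) (skip_diagonal : Bool) (sent_nums : Option (List Int)) (sep : Bool) : List Int :=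
  (PySem.List.pyRange 0 num1 1).foldl (fun idxs i =>
    (PySem.List.pyRange 0 num2 1).foldl (fun idxs j =>
      if i == j && skip_diagonal then idxs
      else if (match sent_nums with
               | some l => PySem.List.pyGetD l i 0 != PySem.List.pyGetD l j 0
               | none => false) then idxs
      else if sep then (idxs ++ [i]) ++ [j]
      else idxs  -- Python appends the tuple (i, j) here, which is not a List Int value; sep = false is excluded by Pre_
    ) idxs) []

-- ===== PORT B =====
def get_pairwise_idxs_alt (num1 : Int) (num2 : Int) (skip_diagonal : Bool) (sent_nums : Option (List Int)) (sep : Bool) : List Int :=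
  if num1 ≤ 0 ∨ num2 ≤ 0 then []
  else
    let pairs : List (Int × Int) :=
      match sent_nums with
      | none =>
          (PySem.List.pyRange 0 num1 1).flatMap (fun i =>
            ((PySem.List.pyRange 0 num2 1).filter (fun j => !(skip_diagonal && i == j))).map (fun j => (i, j)))
      | some l =>
          let groups : PySem.Dict Int (List Int) :=
            (PySem.List.pyRange 0 num2 1).foldl
              (fun d j => d.modify (PySem.List.pyGetD l j 0) [] (· ++ [j])) PySem.Dict.empty
          (PySem.List.pyRange 0 num1 1).flatMap (fun i =>
            ((groups.getD (PySem.List.pyGetD l i 0) []).filter (fun j => !(skip_diagonal && i == j))).map (fun j => (i, j)))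
    if sep then pairs.flatMap (fun p => [p.1, p.2])
    else []  -- Python returns the tuple list here, not a List Int; sep = false is excluded by Pre_

-- ===== PRECONDITION & SPEC =====
-- Pre_ excludes sep = False except where the result is empty, because there A returns a list of
-- TUPLES (not a value of the declared List Int type); and it excludes too-short sent_nums lists,
-- on which A's (or, in the degenerate 1x1-with-skip_diagonal case, B's up-front grouping pass's)
-- indexing of sent_nums raises IndexError.
def Pre_get_pairwise_idxs (num1 : Int) (num2 : Int) (skip_diagonal : Bool) (sent_nums : Option (List Int)) (sep : Bool) : Prop :=
  (sep = true ∨ num1 ≤ 0 ∨ num2 ≤ 0 ∨ (num1 = 1 ∧ num2 = 1 ∧ skip_diagonal = true)) ∧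
  (match sent_nums with
   | none => True
   | some l => (0 < num1 ∧ 0 < num2) → (num1 ≤ (l.length : Int) ∧ num2 ≤ (l.length : Int)))
instance (num1 : Int) (num2 : Int) (skip_diagonal : Bool) (sent_nums : Option (List Int)) (sep : Bool) : Decidable (Pre_get_pairwise_idxs num1 num2 skip_diagonal sent_nums sep) := by
  unfold Pre_get_pairwise_idxs
  cases sent_nums <;> infer_instance

def pvWitness_get_pairwise_idxs : Int × Int × Bool × Option (List Int) × Bool := (2, 3, true, some [7, 7, 9], true)

def Spec_get_pairwise_idxs (num1 : Int) (num2 : Int) (skip_diagonal : Bool) (sent_nums : Option (List Int)) (sep : Bool) (out : List Int) : Prop := out = get_pairwise_idxs_alt num1 num2 skip_diagonal sent_nums sep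
instance (num1 : Int) (num2 : Int) (skip_diagonal : Bool) (sent_nums : Option (List Int)) (sep : Bool) (out : List Int) : Decidable (Spec_get_pairwise_idxs num1 num2 skip_diagonal sent_nums sep out) := by unfold Spec_get_pairwise_idxs; infer_instance

-- ===== CLAIM (what is proved, stated in full; the proofs are below) =====
def Claim_equal_get_pairwise_idxs : Prop := ∀ (num1 : Int) (num2 : Int) (skip_diagonal : Bool) (sent_nums : Option (List Int)) (sep : Bool), Dom_get_pairwise_idxs num1 num2 skip_diagonal sent_nums sep → Pre_get_pairwise_idxs num1 num2 skip_diagonal sent_nums sep → Spec_get_pairwise_idxs num1 num2 skip_diagonal sent_nums sep (get_pairwise_idxs num1 num2 skip_diagonal sent_nums sep)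

-- ===== LEMMAS AND PROOFS =====

-- A's doubly-guarded double-append inner loop, as filter-then-flatMap.
theorem foldl_two_guard_pair (l : List Int) (c1 c2 : Int → Bool) (f g : Int → Int) (acc : List Int) :
    l.foldl (fun acc x => if c1 x then acc
                          else if c2 x then acc
                          else (acc ++ [f x]) ++ [g x]) acc
      = acc ++ (l.filter (fun x => !c1 x && !c2 x)).flatMap (fun x => [f x, g x]) := by
  induction l generalizing acc with
  | nil => simp
  | cons x xs ih =>
    simp only [List.foldl_cons, List.filter_cons]
    by_cases h1 : c1 x
    · simp only [h1, if_true, Bool.not_true, Bool.false_and]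
      rw [ih]
      simp
    · by_cases h2 : c2 x
      · simp only [h1, h2, if_true, Bool.not_true, Bool.not_false,
          Bool.and_false]
        rw [ih]
        simp
      · simp only [h1, h2, Bool.not_false, Bool.true_and]
        rw [ih]
        simp [List.append_assoc]

-- the 1-element range, for the degenerate 1x1 cases
theorem pyRange_zero_one : PySem.List.pyRange 0 1 1 = [0] := rfl

-- A returns [] when a range is empty
theorem empty_of_num1 (num1 num2 : Int) (skip_diagonal : Bool) (sent_nums : Option (List Int)) (sep : Bool) (h : num1 ≤ 0) :
    get_pairwise_idxs num1 num2 skip_diagonal sent_nums sep = [] := by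
  simp [get_pairwise_idxs, PySem.List.pyRange_one_eq_nil (by omega : num1 ≤ 0)]

theorem empty_of_num2 (num1 num2 : Int) (skip_diagonal : Bool) (sent_nums : Option (List Int)) (sep : Bool) (h : num2 ≤ 0) :
    get_pairwise_idxs num1 num2 skip_diagonal sent_nums sep = [] := by
  have hid : ∀ (acc : List Int), List.foldl (fun (a : List Int) (_ : Int) => a) acc
      (PySem.List.pyRange 0 num1 1) = acc := by
    intro acc; induction PySem.List.pyRange 0 num1 1 generalizing acc with
    | nil => rfl
    | cons y ys ih => simpa using ih acc
  simpa [get_pairwise_idxs, PySem.List.pyRange_one_eq_nil (by omega : num2 ≤ 0)] using hid []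

-- A = B, assuming sep = true.
theorem ports_agree (num1 num2 : Int) (skip_diagonal : Bool) (sent_nums : Option (List Int)) :
    get_pairwise_idxs num1 num2 skip_diagonal sent_nums true
      = get_pairwise_idxs_alt num1 num2 skip_diagonal sent_nums true := by
  by_cases hdeg : num1 ≤ 0 ∨ num2 ≤ 0
  · have hA : get_pairwise_idxs num1 num2 skip_diagonal sent_nums true = [] := by
      rcases hdeg with h | h
      · exact empty_of_num1 num1 num2 skip_diagonal sent_nums true h
      · exact empty_of_num2 num1 num2 skip_diagonal sent_nums true h
    simp [hA, get_pairwise_idxs_alt, hdeg]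
  · unfold get_pairwise_idxs get_pairwise_idxs_alt
    simp only [if_neg hdeg]
    have hstep : ∀ (acc : List Int) (i : Int),
        (PySem.List.pyRange 0 num2 1).foldl (fun idxs j =>
          if i == j && skip_diagonal then idxs
          else if (match sent_nums with
                   | some l => PySem.List.pyGetD l i 0 != PySem.List.pyGetD l j 0
                   | none => false) then idxs
          else if true then (idxs ++ [i]) ++ [j] else idxs) acc
        = acc ++ ((PySem.List.pyRange 0 num2 1).filter (fun j =>
              !(i == j && skip_diagonal) &&
              !(match sent_nums with
                | some l => PySem.List.pyGetD l i 0 != PySem.List.pyGetD l j 0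
                | none => false))).flatMap (fun j => [i, j]) := by
      intro acc i
      simpa using foldl_two_guard_pair (PySem.List.pyRange 0 num2 1)
        (fun j => i == j && skip_diagonal)
        (fun j => (match sent_nums with
                   | some l => PySem.List.pyGetD l i 0 != PySem.List.pyGetD l j 0
                   | none => false))
        (fun _ => i) (fun j => j) acc
    refine Eq.trans (PySem.List.foldl_congr_mem _ _
      (fun acc i => acc ++ ((PySem.List.pyRange 0 num2 1).filter (fun j =>
              !(i == j && skip_diagonal) &&
              !(match sent_nums with
                | some l => PySem.List.pyGetD l i 0 != PySem.List.pyGetD l j 0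
                | none => false))).flatMap (fun j => [i, j])) _
      (fun acc i _ => hstep acc i)) ?_
    rw [PySem.List.foldl_append_eq_flatMap]
    rw [if_pos trivial, List.nil_append]
    cases sent_nums with
    | none =>
        simp [List.flatMap_assoc, List.flatMap_map, Bool.and_comm]
    | some l =>
        have hgroups : ∀ k : Int,
            ((PySem.List.pyRange 0 num2 1).foldl
              (fun d j => d.modify (PySem.List.pyGetD l j 0) [] (· ++ [j]))
              PySem.Dict.empty).getD k []
            = (PySem.List.pyRange 0 num2 1).filter (fun j => PySem.List.pyGetD l j 0 == k) := by
          intro k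
          have hfold : (PySem.List.pyRange 0 num2 1).foldl
              (fun d j => PySem.Dict.modify d (PySem.List.pyGetD l j 0) [] (· ++ [j]))
              PySem.Dict.empty
            = ((PySem.List.pyRange 0 num2 1).map (fun j => (PySem.List.pyGetD l j 0, j))).foldl
              (fun d p => PySem.Dict.modify d p.1 [] (· ++ [p.2])) PySem.Dict.empty :=
            (List.foldl_map (f := fun j : Int => (PySem.List.pyGetD l j 0, j))
              (g := fun d p => PySem.Dict.modify d p.1 [] (· ++ [p.2]))).symm
          rw [hfold, PySem.Dict.getD_foldl_modify_append]
          simp [List.filter_map, Function.comp_def]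
        have hpred : ∀ i j : Int,
            (!(i == j && skip_diagonal) &&
              !(PySem.List.pyGetD l i 0 != PySem.List.pyGetD l j 0))
            = (!(skip_diagonal && i == j) &&
              (PySem.List.pyGetD l j 0 == PySem.List.pyGetD l i 0)) := by
          intro i j
          cases skip_diagonal <;> simp [bne, Bool.beq_comm]
        rw [List.flatMap_assoc]
        congr 1
        funext i
        rw [List.flatMap_map, hgroups (PySem.List.pyGetD l i 0), List.filter_filter]
        simp only [hpred]

-- ===== VERDICT (by name: the statement is the Claim_ definition above) =====
theorem get_pairwise_idxs_spec : Claim_equal_get_pairwise_idxs := by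
  intro num1 num2 skip_diagonal sent_nums sep _ hpre
  unfold Spec_get_pairwise_idxs
  obtain ⟨hsep, -⟩ := hpre
  rcases hsep with hsep | h | h | ⟨h1, h2, hsk⟩
  · subst hsep
    exact ports_agree num1 num2 skip_diagonal sent_nums
  · rw [empty_of_num1 num1 num2 skip_diagonal sent_nums sep h]
    simp [get_pairwise_idxs_alt, h]
  · rw [empty_of_num2 num1 num2 skip_diagonal sent_nums sep h]
    simp [get_pairwise_idxs_alt, h]
  · subst h1 h2 hsk
    cases sent_nums with
    | none =>
        cases sep <;>
          simp [get_pairwise_idxs, get_pairwise_idxs_alt, pyRange_zero_one]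
    | some l =>
        cases sep <;>
          simp [get_pairwise_idxs, get_pairwise_idxs_alt, pyRange_zero_one,
            PySem.Dict.getD_modify_self]
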